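-- pv_equiv track=rewrite | github.com/eq4all-projects/SignBLEU | src/signbleu/_analyze.py | connect_nms_blocks_old
-- ===== SOURCE A (Python) =====
-- def connect_nms_blocks_old(instance):
--     nms_channels = [
--         "mouth",
--         "eyebrow",
--         "head",
--     ]
--     if len(instance) == 0:
--         return instance
--     for i in range(len(instance) - 1):
--         for channel in nms_channels:
--             if channel in instance[i] and channel in instance[i+1] and instance[i][channel].replace(':', '') == instance[i+1][channel].replace(':', ''):
--                 if instance[i][channel][-1] != ':':
--                     instance[i][channel] = instance[i][channel] + ':'
--                 if instance[i+1][channel][0] != ':':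
--                     instance[i+1][channel] = ':' + instance[i+1][channel]
--     return instance
-- ===== SOURCE B (Python) =====
-- def connect_nms_blocks_old(instance):
--     # Pure per-block computation: precompute each block's colon-stripped channel
--     # values once, then build a new list where each block's value gains a
--     # trailing ':' when it matches the next block and a leading ':' when it
--     # matches the previous block (A instead mutates dicts pair by pair).
--     channels = ("mouth", "eyebrow", "head")
--     strips = [{ch: d[ch].replace(':', '') for ch in channels if ch in d}
--               for d in instance]
--     n = len(instance)
--     result = []
--     for j, block in enumerate(instance):
--         d = dict(block)
--         for ch in channels:
--             if ch in d:
--                 v = d[ch]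
--                 s = v.replace(':', '')
--                 if j > 0 and strips[j - 1].get(ch) == s and not v.startswith(':'):
--                     v = ':' + v
--                 if j + 1 < n and strips[j + 1].get(ch) == s and not v.endswith(':'):
--                     v = v + ':'
--                 d[ch] = v
--         result.append(d)
--     return result
-- ===== Notes on version B (the rewrite author's own statement) =====
-- stated objective: alternative
-- what changed: B precomputes a colon-stripped value table and builds a new list by a pure per-block computation (leading ':' iff the previous block matches, trailing ':' iff the next block matches), instead of A's sequential in-place mutation of adjacent pairs; Pre_ excludes inputs where A raises IndexError (a channel value that is the empty string matching its neighbour).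
import Mathlib
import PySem

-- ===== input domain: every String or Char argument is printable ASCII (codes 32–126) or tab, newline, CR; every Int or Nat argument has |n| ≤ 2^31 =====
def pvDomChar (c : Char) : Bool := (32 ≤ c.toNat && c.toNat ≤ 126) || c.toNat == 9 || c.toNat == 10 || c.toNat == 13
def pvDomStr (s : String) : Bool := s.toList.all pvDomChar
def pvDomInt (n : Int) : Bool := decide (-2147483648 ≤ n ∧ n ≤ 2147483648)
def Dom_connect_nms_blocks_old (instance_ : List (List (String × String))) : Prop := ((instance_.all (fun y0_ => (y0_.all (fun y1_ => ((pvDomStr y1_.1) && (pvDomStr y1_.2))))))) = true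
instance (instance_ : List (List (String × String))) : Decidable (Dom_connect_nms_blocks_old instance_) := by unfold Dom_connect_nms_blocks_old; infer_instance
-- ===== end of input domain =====

-- B replaces A's sequential in-place pairwise mutation by a pure per-block
-- computation from a precomputed table of colon-stripped channel values
-- (objective: alternative; equal return value — A mutates its argument and
-- returns the same object, B builds a new list and leaves the argument alone).

-- ===== PORT A =====
def pvNms : List String := ["mouth", "eyebrow", "head"]

def pvStrip (s : String) : String := PySem.Str.replace s ":" ""

-- d[ch] = v on a dict with ch present: overwrite first binding in place
def pvSetV : List (String × String) → String → String → List (String × String)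
  | [], _, _ => []
  | (k, w) :: rest, ch, v => if k == ch then (k, v) :: rest else (k, w) :: pvSetV rest ch v

def pvStepA (inst : List (List (String × String))) (i : Nat) (ch : String) :
    List (List (String × String)) :=
  match PySem.List.pyGet? inst (i : Int), PySem.List.pyGet? inst ((i : Int) + 1) with
  | some d1, some d2 =>
    match List.lookup ch d1, List.lookup ch d2 with
    | some v1, some v2 =>
      if pvStrip v1 = pvStrip v2 then
        let inst' :=
          match PySem.Str.pyGet? v1 (-1) with
          | some c => if c ≠ ':' then inst.set i (pvSetV d1 ch (v1 ++ ":")) else inst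
          | none => inst  -- Python raises IndexError here; excluded by Pre_
        match PySem.Str.pyGet? v2 0 with
        | some c => if c ≠ ':' then inst'.set (i + 1) (pvSetV d2 ch (":" ++ v2)) else inst'
        | none => inst'  -- Python raises IndexError here; excluded by Pre_
      else inst
    | _, _ => inst
  | _, _ => inst

def connect_nms_blocks_old (instance_ : List (List (String × String))) :
    List (List (String × String)) :=
  if instance_.length = 0 then instance_
  else
    (List.range (instance_.length - 1)).foldl
      (fun inst i => pvNms.foldl (fun inst ch => pvStepA inst i ch) inst) instance_

-- ===== PORT B =====
def pvStripDict (d : List (String × String)) : List (String × String) :=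
  pvNms.filterMap (fun ch => (List.lookup ch d).map (fun v => (ch, pvStrip v)))

def pvFixBlock (strips : List (List (String × String))) (n j : Nat)
    (d0 : List (String × String)) : List (String × String) :=
  pvNms.foldl (fun d ch =>
    match List.lookup ch d with
    | some v =>
      let s := pvStrip v
      let v1 := if 0 < j ∧ List.lookup ch (strips.getD (j - 1) []) = some s ∧
                    ¬ PySem.Str.startswith v ":" = true then ":" ++ v else v
      let v2 := if j + 1 < n ∧ List.lookup ch (strips.getD (j + 1) []) = some s ∧
                    ¬ PySem.Str.endswith v1 ":" = true then v1 ++ ":" else v1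
      pvSetV d ch v2
    | none => d) d0

def connect_nms_blocks_old_alt (instance_ : List (List (String × String))) :
    List (List (String × String)) :=
  let strips := instance_.map pvStripDict
  instance_.mapIdx (fun j d => pvFixBlock strips instance_.length j d)

-- ===== PRECONDITION & SPEC =====
-- Pre_ excludes exactly the inputs on which A raises IndexError: two adjacent
-- blocks sharing a channel with equal colon-stripped values where at least one
-- of the two values is the empty string (A then indexes value[-1] / value[0]).
def pvPairOK (d1 d2 : List (String × String)) : Bool :=
  pvNms.all fun ch =>
    match List.lookup ch d1, List.lookup ch d2 with
    | some v1, some v2 => pvStrip v1 != pvStrip v2 || (v1 != "" && v2 != "")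
    | _, _ => true

def Pre_connect_nms_blocks_old (instance_ : List (List (String × String))) : Prop :=
  List.IsChain (fun d1 d2 => pvPairOK d1 d2 = true) instance_

instance (instance_ : List (List (String × String))) :
    Decidable (Pre_connect_nms_blocks_old instance_) := by
  unfold Pre_connect_nms_blocks_old; infer_instance

def pvWitness_connect_nms_blocks_old : List (List (String × String)) :=
  [[("mouth", "a"), ("head", "x")], [("mouth", "a")], [("eyebrow", "b:")]]

def Spec_connect_nms_blocks_old (instance_ : List (List (String × String)))
    (out : List (List (String × String))) : Prop :=
  out = connect_nms_blocks_old_alt instance_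

instance (instance_ : List (List (String × String))) (out : List (List (String × String))) :
    Decidable (Spec_connect_nms_blocks_old instance_ out) := by
  unfold Spec_connect_nms_blocks_old; infer_instance

-- ===== CLAIM (what is proved, stated in full; the proofs are below) =====
def Claim_equal_connect_nms_blocks_old : Prop :=
  ∀ (instance_ : List (List (String × String))), Dom_connect_nms_blocks_old instance_ →
    Pre_connect_nms_blocks_old instance_ →
    Spec_connect_nms_blocks_old instance_ (connect_nms_blocks_old instance_)

-- ===== LEMMAS AND PROOFS =====

-- ---- proof-side notions ----

-- does block j match block j+1 on channel ch (colon-stripped values equal)?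
def pvMatchAt (orig : List (List (String × String))) (ch : String) (j : Nat) : Bool :=
  match orig[j]?, orig[j + 1]? with
  | some d1, some d2 =>
    match List.lookup ch d1, List.lookup ch d2 with
    | some v1, some v2 => pvStrip v1 == pvStrip v2
    | _, _ => false
  | _, _ => false

-- decorate one value: leading ':' if pre, trailing ':' if post (with the guards)
def pvDecor1 (pre : Bool) (v : String) : String :=
  if (pre && !PySem.Str.startswith v ":") = true then ":" ++ v else v

def pvDecor (pre post : Bool) (v : String) : String :=
  if (post && !PySem.Str.endswith (pvDecor1 pre v) ":") = true
  then pvDecor1 pre v ++ ":" else pvDecor1 pre v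

-- update one key of a dict by a value transformer (no-op if absent)
def pvUpd1 (t : String → String → String) (d : List (String × String)) (ch : String) :
    List (String × String) :=
  match List.lookup ch d with
  | some v => pvSetV d ch (t ch v)
  | none => d

def pvUpdAll (cs : List String) (t : String → String → String)
    (d : List (String × String)) : List (String × String) :=
  cs.foldl (pvUpd1 t) d

-- the value-level effect of A's pair step on channel ch
def pvPairAct (ch : String) (v1 v2 : String) : String × String :=
  if pvStrip v1 = pvStrip v2 then
    ((match PySem.Str.pyGet? v1 (-1) with
      | some c => if c ≠ ':' then v1 ++ ":" else v1
      | none => v1),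
     (match PySem.Str.pyGet? v2 0 with
      | some c => if c ≠ ':' then ":" ++ v2 else v2
      | none => v2))
  else (v1, v2)

def pvPairStep (ch : String) (p : List (String × String) × List (String × String)) :
    List (String × String) × List (String × String) :=
  match List.lookup ch p.1, List.lookup ch p.2 with
  | some v1, some v2 =>
    (pvSetV p.1 ch (pvPairAct ch v1 v2).1, pvSetV p.2 ch (pvPairAct ch v1 v2).2)
  | _, _ => p

def pvPreB (orig : List (List (String × String))) (k j : Nat) (ch : String) : Bool :=
  decide (0 < j) && decide (j ≤ k) && pvMatchAt orig ch (j - 1)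

def pvPostB (orig : List (List (String × String))) (k j : Nat) (ch : String) : Bool :=
  decide (j < k) && pvMatchAt orig ch j

-- the state of A's loop after the first k pairs have been processed
def pvStateAt (orig : List (List (String × String))) (k : Nat) :
    List (List (String × String)) :=
  orig.mapIdx (fun j d =>
    pvUpdAll pvNms (fun ch v => pvDecor (pvPreB orig k j ch) (pvPostB orig k j ch) v) d)

-- the final per-block transformer (both programs compute this)
def pvTFin (orig : List (List (String × String))) (j : Nat) (ch : String) (v : String) :
    String :=
  pvDecor (decide (0 < j) && pvMatchAt orig ch (j - 1)) (pvMatchAt orig ch j) v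

-- ---- string lemmas ----

theorem pv_replace_go (fuel : Nat) : ∀ (l acc : List Char), l.length ≤ fuel →
    PySem.Chars.replace.go [':'] [] fuel l acc = acc.reverse ++ l.filter (· != ':') := by
  induction fuel with
  | zero => intro l acc h; have : l = [] := by simpa using h
            subst this; simp [PySem.Chars.replace.go]
  | succ n ih =>
    intro l acc h
    cases l with
    | nil => simp [PySem.Chars.replace.go]
    | cons c t =>
      by_cases hc : c = ':'
      · subst hc
        have : PySem.Chars.replace.go [':'] [] (n+1) (':' :: t) acc
            = PySem.Chars.replace.go [':'] [] n t acc := by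
          simp [PySem.Chars.replace.go, List.isPrefixOf]
        rw [this, ih t acc (by simpa using h)]
        simp
      · have : PySem.Chars.replace.go [':'] [] (n+1) (c :: t) acc
            = PySem.Chars.replace.go [':'] [] n t (c :: acc) := by
          simp [PySem.Chars.replace.go, List.isPrefixOf, hc, Ne.symm hc]
        rw [this, ih t (c :: acc) (by simpa using h)]
        simp [hc]

theorem pv_strip_ofList (s : String) :
    pvStrip s = String.ofList (s.toList.filter (· != ':')) := by
  unfold pvStrip PySem.Str.replace
  congr 1
  rw [PySem.Chars.replace]
  have h1 : (":" : String).toList = [':'] := by decide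
  have h2 : ("" : String).toList = [] := by decide
  rw [h1, h2]
  simp only [List.isEmpty, if_neg]
  exact pv_replace_go _ _ _ le_rfl


theorem pv_strip_pre (v : String) : pvStrip (":" ++ v) = pvStrip v := by
  rw [pv_strip_ofList, pv_strip_ofList]
  congr 1
  rw [String.toList_append]
  simp [show (":" : String).toList = [':'] by decide]

theorem pv_strip_post (v : String) : pvStrip (v ++ ":") = pvStrip v := by
  rw [pv_strip_ofList, pv_strip_ofList]
  congr 1
  rw [String.toList_append]
  simp [show (":" : String).toList = [':'] by decide]

theorem pv_strip_decor1 (p : Bool) (v : String) : pvStrip (pvDecor1 p v) = pvStrip v := by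
  unfold pvDecor1; split <;> simp [pv_strip_pre]

theorem pv_strip_decor (p q : Bool) (v : String) : pvStrip (pvDecor p q v) = pvStrip v := by
  unfold pvDecor; split <;> simp [pv_strip_post, pv_strip_decor1]

theorem pv_ne_empty_iff (v : String) : v ≠ "" ↔ v.toList ≠ [] := by
  constructor
  · intro h hh; exact h (by simpa using hh)
  · intro h hh; exact h (by simp [hh])

theorem pv_pyGet_last (v : String) : PySem.Str.pyGet? v (-1) = v.toList.getLast? := by
  rw [PySem.Str.pyGet?_eq v (-1)]
  simp [PySem.List.pyGet?_neg_one]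

theorem pv_pyGet_head (v : String) : PySem.Str.pyGet? v 0 = v.toList.head? := by
  rw [PySem.Str.pyGet?_eq v 0]
  simp [PySem.List.pyGet?_zero, List.head?_eq_getElem?]

theorem pv_ends_iff (v : String) :
    PySem.Str.endswith v ":" = true ↔ v.toList.getLast? = some ':' := by
  rw [PySem.Str.endswith_eq, PySem.Chars.endswith_iff,
    show (":" : String).toList = [':'] by decide]
  constructor
  · rintro ⟨t, ht⟩; rw [← ht]; simp
  · intro h
    have hne : v.toList ≠ [] := by intro hh; rw [hh] at h; simp at h
    have hg : v.toList.getLast hne = ':' := by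
      rw [List.getLast?_eq_some_getLast hne] at h; exact Option.some.inj h
    refine ⟨v.toList.dropLast, ?_⟩
    rw [← hg]
    exact List.dropLast_append_getLast hne

theorem pv_starts_iff (v : String) :
    PySem.Str.startswith v ":" = true ↔ v.toList.head? = some ':' := by
  rw [PySem.Str.startswith_eq, PySem.Chars.startswith_iff,
    show (":" : String).toList = [':'] by decide]
  constructor
  · rintro ⟨t, ht⟩; rw [← ht]; simp
  · intro h
    cases hv : v.toList with
    | nil => rw [hv] at h; simp at h
    | cons c t =>
      rw [hv] at h; simp at h
      exact ⟨t, by rw [h]; simp⟩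

theorem pv_decor1_ne_nil (p : Bool) (v : String) (h : v.toList ≠ []) :
    (pvDecor1 p v).toList ≠ [] := by
  unfold pvDecor1; split <;> simp_all [String.toList_append]

theorem pv_decor_ne_nil (p q : Bool) (v : String) (h : v.toList ≠ []) :
    (pvDecor p q v).toList ≠ [] := by
  have h1 : (pvDecor1 p v).toList ≠ [] := pv_decor1_ne_nil p v h
  unfold pvDecor; split
  · simp [String.toList_append]
  · exact h1

-- ---- dict lemmas ----

theorem pv_lookup_setV_self (d : List (String × String)) (ch : String) (v w : String)
    (h : List.lookup ch d = some w) : List.lookup ch (pvSetV d ch v) = some v := by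
  induction d with
  | nil => simp [List.lookup] at h
  | cons p rest ih =>
    obtain ⟨k, w'⟩ := p
    by_cases hk : k = ch
    · subst hk; simp [pvSetV, List.lookup]
    · have hb : (ch == k) = false := by simp [Ne.symm hk]
      have hb2 : (k == ch) = false := by simp [hk]
      simp [pvSetV, List.lookup, hb, hb2] at h ⊢
      exact ih h

theorem pv_lookup_setV_ne (d : List (String × String)) (ch ch' : String) (v : String)
    (h : ch' ≠ ch) : List.lookup ch' (pvSetV d ch v) = List.lookup ch' d := by
  induction d with
  | nil => simp [pvSetV]
  | cons p rest ih =>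
    obtain ⟨k, w⟩ := p
    by_cases hk : k = ch
    · subst hk
      have hb : (ch' == k) = false := by simp [h]
      simp [pvSetV, List.lookup, hb]
    · have hb2 : (k == ch) = false := by simp [hk]
      simp [pvSetV, List.lookup, hb2]
      by_cases hk2 : ch' = k
      · simp [hk2]
      · have hb3 : (ch' == k) = false := by simp [hk2]
        simp [hb3, ih]

theorem pv_setV_self (d : List (String × String)) (ch : String) (v : String)
    (h : List.lookup ch d = some v) : pvSetV d ch v = d := by
  induction d with
  | nil => rfl
  | cons p rest ih =>
    obtain ⟨k, w⟩ := p
    by_cases hk : k = ch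
    · subst hk; simp [List.lookup] at h; simp [pvSetV, h]
    · have hb : (ch == k) = false := by simp [Ne.symm hk]
      have hb2 : (k == ch) = false := by simp [hk]
      simp [List.lookup, hb] at h; simp [pvSetV, hb2, ih h]

theorem pv_setV_setV_same (d : List (String × String)) (ch : String) (v v' : String) :
    pvSetV (pvSetV d ch v) ch v' = pvSetV d ch v' := by
  induction d with
  | nil => rfl
  | cons p rest ih =>
    obtain ⟨k, w⟩ := p
    by_cases hk : k = ch
    · subst hk; simp [pvSetV]
    · have hb : (k == ch) = false := by simp [hk]
      simp [pvSetV, hb, ih]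

theorem pv_setV_comm (d : List (String × String)) (c c' : String) (v v' : String)
    (h : c ≠ c') : pvSetV (pvSetV d c v) c' v' = pvSetV (pvSetV d c' v') c v := by
  induction d with
  | nil => rfl
  | cons p rest ih =>
    obtain ⟨k, w⟩ := p
    by_cases hk : k = c
    · subst hk
      have hb : (k == c') = false := by simp [h]
      simp [pvSetV, hb]
    · have hb : (k == c) = false := by simp [hk]
      by_cases hk2 : k = c'
      · subst hk2; simp [pvSetV, hb]
      · have hb2 : (k == c') = false := by simp [hk2]
        simp [pvSetV, hb, hb2, ih]

theorem pv_upd1_none (t : String → String → String) (d : List (String × String))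
    (c : String) (hl : List.lookup c d = none) : pvUpd1 t d c = d := by
  unfold pvUpd1; rw [hl]

theorem pv_upd1_some (t : String → String → String) (d : List (String × String))
    (c : String) (v : String) (hl : List.lookup c d = some v) :
    pvUpd1 t d c = pvSetV d c (t c v) := by
  unfold pvUpd1; rw [hl]

theorem pv_lookup_upd1_ne (t : String → String → String) (d : List (String × String))
    (c ch : String) (h : ch ≠ c) : List.lookup ch (pvUpd1 t d c) = List.lookup ch d := by
  cases hl : List.lookup c d with
  | none => rw [pv_upd1_none t d c hl]
  | some v => rw [pv_upd1_some t d c v hl]; exact pv_lookup_setV_ne d c ch (t c v) h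

theorem pv_lookup_updAll_notMem (cs : List String) (t : String → String → String) :
    ∀ (d : List (String × String)) (ch : String), ch ∉ cs →
    List.lookup ch (pvUpdAll cs t d) = List.lookup ch d := by
  induction cs with
  | nil => intro d ch _; rfl
  | cons c cs ih =>
    intro d ch h
    simp only [List.mem_cons, not_or] at h
    show List.lookup ch (pvUpdAll cs t (pvUpd1 t d c)) = _
    rw [ih _ _ h.2, pv_lookup_upd1_ne _ _ _ _ h.1]

theorem pv_lookup_updAll_mem (cs : List String) (t : String → String → String) :
    ∀ (d : List (String × String)) (ch : String), cs.Nodup → ch ∈ cs →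
    List.lookup ch (pvUpdAll cs t d) = (List.lookup ch d).map (t ch) := by
  induction cs with
  | nil => intro d ch _ h; simp at h
  | cons c cs ih =>
    intro d ch hnd h
    simp only [List.nodup_cons] at hnd
    show List.lookup ch (pvUpdAll cs t (pvUpd1 t d c)) = _
    rcases List.mem_cons.mp h with hc | hc
    · subst hc
      rw [pv_lookup_updAll_notMem cs t _ _ hnd.1]
      cases hl : List.lookup ch d with
      | none => rw [pv_upd1_none t d ch hl, hl]; rfl
      | some v => rw [pv_upd1_some t d ch v hl, pv_lookup_setV_self d ch _ v hl]; rfl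
    · rw [ih _ _ hnd.2 hc, pv_lookup_upd1_ne]
      intro hh; subst hh; exact hnd.1 hc

theorem pv_updAll_congr (cs : List String) (t t' : String → String → String) :
    ∀ (d : List (String × String)), cs.Nodup →
    (∀ ch ∈ cs, ∀ v, List.lookup ch d = some v → t ch v = t' ch v) →
    pvUpdAll cs t d = pvUpdAll cs t' d := by
  induction cs with
  | nil => intro d _ _; rfl
  | cons c cs ih =>
    intro d hnd h
    simp only [List.nodup_cons] at hnd
    show pvUpdAll cs t (pvUpd1 t d c) = pvUpdAll cs t' (pvUpd1 t' d c)
    have h1 : pvUpd1 t d c = pvUpd1 t' d c := by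
      cases hl : List.lookup c d with
      | none => rw [pv_upd1_none t d c hl, pv_upd1_none t' d c hl]
      | some v => rw [pv_upd1_some t d c v hl, pv_upd1_some t' d c v hl, h c (by simp) v hl]
    rw [h1]
    refine ih _ hnd.2 ?_
    intro ch hch v hl
    refine h ch (by simp [hch]) v ?_
    rwa [pv_lookup_upd1_ne t' d c ch (fun hh => hnd.1 (hh ▸ hch)) ] at hl

theorem pv_upd1_comm (t t' : String → String → String) (d : List (String × String))
    (c c' : String) (h : c ≠ c') :
    pvUpd1 t (pvUpd1 t' d c') c = pvUpd1 t' (pvUpd1 t d c) c' := by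
  cases hc' : List.lookup c' d with
  | none =>
    rw [pv_upd1_none t' d c' hc',
      pv_upd1_none t' (pvUpd1 t d c) c'
        (by rw [pv_lookup_upd1_ne t d c c' (Ne.symm h)]; exact hc')]
  | some v' =>
    cases hc : List.lookup c d with
    | none =>
      rw [pv_upd1_none t d c hc,
        pv_upd1_none t (pvUpd1 t' d c') c
          (by rw [pv_lookup_upd1_ne t' d c' c h]; exact hc)]
    | some v =>
      rw [pv_upd1_some t' d c' v' hc', pv_upd1_some t d c v hc]
      rw [pv_upd1_some t (pvSetV d c' (t' c' v')) c v
          (by rw [pv_lookup_setV_ne d c' c _ h]; exact hc)]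
      rw [pv_upd1_some t' (pvSetV d c (t c v)) c' v'
          (by rw [pv_lookup_setV_ne d c c' _ (Ne.symm h)]; exact hc')]
      rw [pv_setV_comm d c c' _ _ h]

theorem pv_upd1_updAll_comm (cs : List String) (t t' : String → String → String) :
    ∀ (d : List (String × String)) (c : String), c ∉ cs →
    pvUpd1 t' (pvUpdAll cs t d) c = pvUpdAll cs t (pvUpd1 t' d c) := by
  induction cs with
  | nil => intro d c _; rfl
  | cons c0 cs ih =>
    intro d c h
    simp only [List.mem_cons, not_or] at h
    show pvUpd1 t' (pvUpdAll cs t (pvUpd1 t d c0)) c = pvUpdAll cs t (pvUpd1 t (pvUpd1 t' d c) c0)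
    rw [ih _ _ h.2, pv_upd1_comm t' t _ c c0 h.1]

theorem pv_upd1_same (t t' : String → String → String) (d : List (String × String))
    (c : String) : pvUpd1 t (pvUpd1 t' d c) c = pvUpd1 (fun ch v => t ch (t' ch v)) d c := by
  cases hl : List.lookup c d with
  | none => rw [pv_upd1_none t' d c hl, pv_upd1_none t d c hl,
      pv_upd1_none (fun ch v => t ch (t' ch v)) d c hl]
  | some v =>
    rw [pv_upd1_some t' d c v hl,
      pv_upd1_some t (pvSetV d c (t' c v)) c (t' c v)
        (pv_lookup_setV_self d c _ v hl),
      pv_setV_setV_same, pv_upd1_some (fun ch v => t ch (t' ch v)) d c v hl]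

theorem pv_updAll_updAll (cs : List String) (t t' : String → String → String) :
    ∀ (d : List (String × String)), cs.Nodup →
    pvUpdAll cs t' (pvUpdAll cs t d) = pvUpdAll cs (fun ch v => t' ch (t ch v)) d := by
  induction cs with
  | nil => intro d _; rfl
  | cons c cs ih =>
    intro d hnd
    simp only [List.nodup_cons] at hnd
    show pvUpdAll cs t' (pvUpd1 t' (pvUpdAll cs t (pvUpd1 t d c)) c) = pvUpdAll cs _ (pvUpd1 _ d c)
    rw [pv_upd1_updAll_comm cs t t' _ c hnd.1, pv_upd1_same, ih _ hnd.2]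

theorem pv_updAll_id (cs : List String) : ∀ (d : List (String × String)),
    pvUpdAll cs (fun _ v => v) d = d := by
  induction cs with
  | nil => intro d; rfl
  | cons c cs ih =>
    intro d
    show pvUpdAll cs _ (pvUpd1 _ d c) = d
    have : pvUpd1 (fun _ v => v) d c = d := by
      cases hl : List.lookup c d with
      | none => exact pv_upd1_none _ d c hl
      | some v => rw [pv_upd1_some _ d c v hl]; exact pv_setV_self d c v hl
    rw [this, ih]

-- ---- fold characterizations ----

theorem pv_pairFold (cs : List String) :
    ∀ (a b : List (String × String)) (t1 t2 : String → String → String), cs.Nodup →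
    (∀ ch ∈ cs,
      (∀ v1 v2, List.lookup ch a = some v1 → List.lookup ch b = some v2 →
        pvPairAct ch v1 v2 = (t1 ch v1, t2 ch v2)) ∧
      (List.lookup ch b = none → ∀ v1, List.lookup ch a = some v1 → t1 ch v1 = v1) ∧
      (List.lookup ch a = none → ∀ v2, List.lookup ch b = some v2 → t2 ch v2 = v2)) →
    cs.foldl (fun p ch => pvPairStep ch p) (a, b) = (pvUpdAll cs t1 a, pvUpdAll cs t2 b) := by
  induction cs with
  | nil => intro a b t1 t2 _ _; rfl
  | cons c cs ih =>
    intro a b t1 t2 hnd h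
    simp only [List.nodup_cons] at hnd
    have hstep : pvPairStep c (a, b) = (pvUpd1 t1 a c, pvUpd1 t2 b c) := by
      cases hla : List.lookup c a with
      | some v1 =>
        cases hlb : List.lookup c b with
        | some v2 =>
          have hact := (h c (by simp)).1 v1 v2 hla hlb
          simp only [pvPairStep, hla, hlb, hact]
          rw [pv_upd1_some t1 a c v1 hla, pv_upd1_some t2 b c v2 hlb]
        | none =>
          have hid := (h c (by simp)).2.1 hlb v1 hla
          simp only [pvPairStep, hla, hlb]
          rw [pv_upd1_some t1 a c v1 hla, hid, pv_setV_self a c v1 hla,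
            pv_upd1_none t2 b c hlb]
      | none =>
        cases hlb : List.lookup c b with
        | some v2 =>
          have hid := (h c (by simp)).2.2 hla v2 hlb
          simp only [pvPairStep, hla, hlb]
          rw [pv_upd1_none t1 a c hla, pv_upd1_some t2 b c v2 hlb, hid,
            pv_setV_self b c v2 hlb]
        | none =>
          simp only [pvPairStep, hla, hlb]
          rw [pv_upd1_none t1 a c hla, pv_upd1_none t2 b c hlb]
    show cs.foldl (fun p ch => pvPairStep ch p) (pvPairStep c (a, b)) = _
    rw [hstep]
    rw [ih (pvUpd1 t1 a c) (pvUpd1 t2 b c) t1 t2 hnd.2 ?_]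
    · rfl
    · intro ch hch
      have hne : ch ≠ c := fun e => hnd.1 (e ▸ hch)
      rw [pv_lookup_upd1_ne t1 a c ch hne, pv_lookup_upd1_ne t2 b c ch hne]
      exact h ch (List.mem_cons_of_mem c hch)

theorem pv_set2_self (inst : List (List (String × String))) (k : Nat)
    (a b : List (String × String)) (ha : inst[k]? = some a) (hb : inst[k + 1]? = some b) :
    (inst.set k a).set (k + 1) b = inst := by
  obtain ⟨hlt, he⟩ := List.getElem?_eq_some_iff.mp ha
  obtain ⟨hlt2, he2⟩ := List.getElem?_eq_some_iff.mp hb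
  rw [← he, ← he2, List.set_getElem_self, List.set_getElem_self]

theorem pv_stepA_pair (inst : List (List (String × String))) (k : Nat)
    (a b : List (String × String)) (c : String)
    (ha : inst[k]? = some a) (hb : inst[k + 1]? = some b) :
    pvStepA inst k c =
      (inst.set k (pvPairStep c (a, b)).1).set (k + 1) (pvPairStep c (a, b)).2 := by
  have hcast : ((k : Int) + 1) = (((k + 1 : Nat) : Int)) := by push_cast; ring
  have hg1 : PySem.List.pyGet? inst (k : Int) = some a := by
    rw [PySem.List.pyGet?_natCast]; exact ha
  have hg2 : PySem.List.pyGet? inst ((k : Int) + 1) = some b := by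
    rw [hcast, PySem.List.pyGet?_natCast]; exact hb
  cases hla : List.lookup c a with
  | none =>
    simp only [pvStepA, hg1, hg2, hla, pvPairStep]
    rw [pv_set2_self inst k a b ha hb]
  | some v1 =>
    cases hlb : List.lookup c b with
    | none =>
      simp only [pvStepA, hg1, hg2, hla, hlb, pvPairStep]
      rw [pv_set2_self inst k a b ha hb]
    | some v2 =>
      simp only [pvStepA, hg1, hg2, hla, hlb, pvPairStep, pvPairAct]
      by_cases hs : pvStrip v1 = pvStrip v2
      · obtain ⟨hlt, he⟩ := List.getElem?_eq_some_iff.mp ha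
        obtain ⟨hlt2, he2⟩ := List.getElem?_eq_some_iff.mp hb
        have sa : pvSetV a c v1 = a := pv_setV_self a c v1 hla
        have sb : pvSetV b c v2 = b := pv_setV_self b c v2 hlb
        have s1 : inst.set k a = inst := by rw [← he, List.set_getElem_self]
        have se : (inst.set k a).set (k + 1) b = inst := pv_set2_self inst k a b ha hb
        have hss : ∀ x, (inst.set k x).set (k + 1) b = inst.set k x := by
          intro x
          have hx : (inst.set k x)[k + 1]? = some b := by
            rw [List.getElem?_set_ne (by omega)]; exact hb
          obtain ⟨hx1, hx2⟩ := List.getElem?_eq_some_iff.mp hx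
          rw [← hx2, List.set_getElem_self]
        have s2 : inst.set (k + 1) b = inst := by rw [← he2, List.set_getElem_self]
        simp only [hs, if_pos rfl]
        cases h1 : PySem.Str.pyGet? v1 (-1) with
        | none =>
          cases h2 : PySem.Str.pyGet? v2 0 with
          | none => simp [sa, sb, s2, se]
          | some c2 => by_cases hc2 : c2 = ':' <;> simp [sa, sb, s1, s2, se, hss, hc2]
        | some c1 =>
          cases h2 : PySem.Str.pyGet? v2 0 with
          | none => by_cases hc1 : c1 = ':' <;> simp [sa, sb, s1, s2, se, hss, hc1]
          | some c2 =>
            by_cases hc1 : c1 = ':' <;> by_cases hc2 : c2 = ':' <;>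
              simp [sa, sb, s1, s2, se, hss, hc1, hc2]
      · simp only [if_neg hs]
        rw [pv_setV_self a c v1 hla, pv_setV_self b c v2 hlb,
          pv_set2_self inst k a b ha hb]

theorem pv_stepFold (cs : List String) :
    ∀ (inst : List (List (String × String))) (k : Nat) (a b : List (String × String)),
    k + 1 < inst.length → inst[k]? = some a → inst[k + 1]? = some b →
    cs.foldl (fun i ch => pvStepA i k ch) inst =
      (inst.set k (cs.foldl (fun p ch => pvPairStep ch p) (a, b)).1).set (k + 1)
        (cs.foldl (fun p ch => pvPairStep ch p) (a, b)).2 := by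
  induction cs with
  | nil =>
    intro inst k a b hk ha hb
    exact (pv_set2_self inst k a b ha hb).symm
  | cons c cs ih =>
    intro inst k a b hk ha hb
    have hstep := pv_stepA_pair inst k a b c ha hb
    set p1 := (pvPairStep c (a, b)).1 with hp1
    set p2 := (pvPairStep c (a, b)).2 with hp2
    have hlen : ((inst.set k p1).set (k + 1) p2).length = inst.length := by simp
    have ha2 : ((inst.set k p1).set (k + 1) p2)[k]? = some p1 := by
      rw [List.getElem?_set_ne (by omega), List.getElem?_set_self (by omega)]
    have hb2 : ((inst.set k p1).set (k + 1) p2)[k + 1]? = some p2 := by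
      rw [List.getElem?_set_self (by rw [List.length_set]; omega)]
    show cs.foldl (fun i ch => pvStepA i k ch) (pvStepA inst k c) = _
    rw [hstep]
    rw [ih _ k p1 p2 (by rw [hlen]; exact hk) ha2 hb2]
    have hcollapse : ∀ (u w : List (String × String)),
        (((inst.set k p1).set (k + 1) p2).set k u).set (k + 1) w =
          (inst.set k u).set (k + 1) w := by
      intro u w
      rw [List.set_comm _ _ (by omega : k ≠ k + 1), List.set_set,
        List.set_comm _ _ (by omega : k + 1 ≠ k), List.set_set]
    rw [hcollapse]
    rfl

-- ---- assembling the invariant ----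

theorem pv_match_lt (orig : List (List (String × String))) (ch : String) (j : Nat)
    (h : pvMatchAt orig ch j = true) : j + 1 < orig.length := by
  cases h2 : orig[j + 1]? with
  | some d2 => exact (List.getElem?_eq_some_iff.mp h2).1
  | none =>
    exfalso
    unfold pvMatchAt at h
    cases h1 : orig[j]? <;> rw [h1, h2] at h <;> simp at h

theorem pv_match_intro (orig : List (List (String × String))) (ch : String) (j : Nat)
    (d1 d2 : List (String × String)) (v1 v2 : String)
    (h1 : orig[j]? = some d1) (h2 : orig[j + 1]? = some d2)
    (l1 : List.lookup ch d1 = some v1) (l2 : List.lookup ch d2 = some v2) :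
    pvMatchAt orig ch j = (pvStrip v1 == pvStrip v2) := by
  simp only [pvMatchAt, h1, h2, l1, l2]

theorem pv_match_none_left (orig : List (List (String × String))) (ch : String) (j : Nat)
    (d1 : List (String × String)) (h1 : orig[j]? = some d1)
    (l1 : List.lookup ch d1 = none) : pvMatchAt orig ch j = false := by
  cases h2 : orig[j + 1]? with
  | none => simp only [pvMatchAt, h1, h2]
  | some d2 => simp only [pvMatchAt, h1, h2, l1]

theorem pv_match_none_right (orig : List (List (String × String))) (ch : String) (j : Nat)
    (d2 : List (String × String)) (h2 : orig[j + 1]? = some d2)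
    (l2 : List.lookup ch d2 = none) : pvMatchAt orig ch j = false := by
  cases h1 : orig[j]? with
  | none => simp only [pvMatchAt, h1]
  | some d1 => simp only [pvMatchAt, h1, h2, l2]; cases List.lookup ch d1 <;> rfl

theorem pv_pre_nonempty (orig : List (List (String × String)))
    (hpre : Pre_connect_nms_blocks_old orig) (k : Nat) (ch : String) (hch : ch ∈ pvNms)
    (d1 d2 : List (String × String)) (v1 v2 : String)
    (h1 : orig[k]? = some d1) (h2 : orig[k + 1]? = some d2)
    (l1 : List.lookup ch d1 = some v1) (l2 : List.lookup ch d2 = some v2)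
    (hs : pvStrip v1 = pvStrip v2) : v1 ≠ "" ∧ v2 ≠ "" := by
  have hlt : k + 1 < orig.length := (List.getElem?_eq_some_iff.mp h2).1
  have hpk := (List.isChain_iff_getElem.mp hpre) k hlt
  rw [(List.getElem?_eq_some_iff.mp h1).2, (List.getElem?_eq_some_iff.mp h2).2] at hpk
  unfold pvPairOK at hpk
  rw [List.all_eq_true] at hpk
  have hb := hpk ch hch
  simp only [l1, l2] at hb
  simp [hs] at hb
  exact ⟨hb.1, hb.2⟩

theorem pv_lookup_stripDict (d : List (String × String)) (ch : String) (h : ch ∈ pvNms) :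
    List.lookup ch (pvStripDict d) = (List.lookup ch d).map pvStrip := by
  have h3 : ch = "mouth" ∨ ch = "eyebrow" ∨ ch = "head" := by simpa [pvNms] using h
  cases hm : List.lookup "mouth" d <;> cases he : List.lookup "eyebrow" d <;>
    cases hh : List.lookup "head" d <;>
    rcases h3 with h3 | h3 | h3 <;> subst h3 <;>
    simp [pvStripDict, pvNms, hm, he, hh, List.lookup]

theorem pv_state_zero (orig : List (List (String × String))) : pvStateAt orig 0 = orig := by
  unfold pvStateAt
  apply List.ext_getElem (by simp)
  intro i hi1 hi2
  rw [List.getElem_mapIdx]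
  have ht : ∀ ch v, pvDecor (pvPreB orig 0 i ch) (pvPostB orig 0 i ch) v = v := by
    intro ch v
    have e1 : pvPreB orig 0 i ch = false := by
      by_cases hi : 0 < i
      · have : ¬ i ≤ 0 := by omega
        simp [pvPreB, this]
      · simp [pvPreB, hi]
    have e2 : pvPostB orig 0 i ch = false := by simp [pvPostB]
    rw [e1, e2]
    simp [pvDecor, pvDecor1]
  rw [pv_updAll_congr pvNms _ (fun _ v => v) _ (by decide) (fun ch _ v _ => ht ch v),
    pv_updAll_id]

theorem pv_main (orig : List (List (String × String)))
    (hpre : Pre_connect_nms_blocks_old orig) :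
    ∀ k, k ≤ orig.length - 1 →
    (List.range k).foldl
      (fun inst i => pvNms.foldl (fun inst ch => pvStepA inst i ch) inst) orig =
      pvStateAt orig k := by
  intro k
  induction k with
  | zero => intro _; rw [pv_state_zero]; rfl
  | succ k ih =>
    intro hk
    have hk1 : k ≤ orig.length - 1 := by omega
    have hn : k + 1 < orig.length := by omega
    have hok : k < orig.length := by omega
    rw [List.range_succ, List.foldl_append, ih hk1]
    simp only [List.foldl_cons, List.foldl_nil]
    have hlenS : (pvStateAt orig k).length = orig.length := by simp [pvStateAt]
    have hak : (pvStateAt orig k)[k]? =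
        some (pvUpdAll pvNms
          (fun ch v => pvDecor (pvPreB orig k k ch) (pvPostB orig k k ch) v) orig[k]) := by
      unfold pvStateAt
      rw [List.getElem?_mapIdx, List.getElem?_eq_getElem hok]
      rfl
    have hbk : (pvStateAt orig k)[k + 1]? = some orig[k + 1] := by
      unfold pvStateAt
      rw [List.getElem?_mapIdx, List.getElem?_eq_getElem hn]
      have ht : ∀ ch v, pvDecor (pvPreB orig k (k + 1) ch) (pvPostB orig k (k + 1) ch) v = v := by
        intro ch v
        have e1 : pvPreB orig k (k + 1) ch = false := by
          unfold pvPreB; rw [decide_eq_false (by omega : ¬ k + 1 ≤ k)]; simp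
        have e2 : pvPostB orig k (k + 1) ch = false := by
          unfold pvPostB; rw [decide_eq_false (by omega : ¬ k + 1 < k)]; simp
        rw [e1, e2]; simp [pvDecor, pvDecor1]
      simp only [Option.map_some, Option.some.injEq]
      rw [pv_updAll_congr pvNms _ (fun _ v => v) _ (by decide) (fun ch _ v _ => ht ch v),
        pv_updAll_id]
    have hko : orig[k]? = some orig[k] := List.getElem?_eq_getElem hok
    have hko1 : orig[k + 1]? = some orig[k + 1] := List.getElem?_eq_getElem hn
    rw [pv_stepFold pvNms (pvStateAt orig k) k _ _ (by omega) hak hbk]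
    rw [pv_pairFold pvNms _ _
      (fun ch w => if (pvMatchAt orig ch k && !PySem.Str.endswith w ":") = true
        then w ++ ":" else w)
      (fun ch v => if (pvMatchAt orig ch k && !PySem.Str.startswith v ":") = true
        then ":" ++ v else v)
      (by decide) ?hyp]
    case hyp =>
      intro ch hch
      refine ⟨?_, ?_, ?_⟩
      · intro v1 v2 hv1 hv2
        rw [pv_lookup_updAll_mem pvNms _ orig[k] ch (by decide) hch] at hv1
        obtain ⟨v0, hv0, hv0tr⟩ := Option.map_eq_some_iff.mp hv1
        have hmatch := pv_match_intro orig ch k orig[k] orig[k + 1] v0 v2 hko hko1 hv0 hv2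
        by_cases hm : pvMatchAt orig ch k = true
        · have hs0 : pvStrip v0 = pvStrip v2 := by
            have := hm; rw [hmatch] at this; exact beq_iff_eq.mp this
          have hs1 : pvStrip v1 = pvStrip v2 := by
            rw [← hv0tr, pv_strip_decor]; exact hs0
          obtain ⟨hne0, hne2⟩ :=
            pv_pre_nonempty orig hpre k ch hch orig[k] orig[k + 1] v0 v2 hko hko1 hv0 hv2 hs0
          have hne1 : v1.toList ≠ [] := by
            rw [← hv0tr]; exact pv_decor_ne_nil _ _ v0 ((pv_ne_empty_iff v0).mp hne0)
          unfold pvPairAct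
          rw [if_pos hs1]
          congr 1
          · cases hgl : v1.toList.getLast? with
            | none => exact absurd (List.getLast?_eq_none_iff.mp hgl) hne1
            | some c1 =>
              simp only [pv_pyGet_last, hgl]
              by_cases hc : c1 = ':'
              · have hend : PySem.Str.endswith v1 ":" = true :=
                  (pv_ends_iff v1).mpr (hc ▸ hgl)
                have hendc : PySem.Chars.endswith v1.toList [':'] = true := by simpa using hend
                simp [hc, hm, hendc]
              · have hend : PySem.Str.endswith v1 ":" = false := by
                  rw [← Bool.not_eq_true]
                  intro hcon
                  have := (pv_ends_iff v1).mp hcon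
                  rw [hgl] at this
                  exact hc (Option.some.inj this)
                have hendc : PySem.Chars.endswith v1.toList [':'] = false := by simpa using hend
                simp [hc, hm, hendc]
          · cases hgl : v2.toList.head? with
            | none => exact absurd (List.head?_eq_none_iff.mp hgl) ((pv_ne_empty_iff v2).mp hne2)
            | some c2 =>
              simp only [pv_pyGet_head, hgl]
              by_cases hc : c2 = ':'
              · have hst : PySem.Str.startswith v2 ":" = true :=
                  (pv_starts_iff v2).mpr (hc ▸ hgl)
                have hstc : PySem.Chars.startswith v2.toList [':'] = true := by simpa using hst
                simp [hc, hm, hstc]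
              · have hst : PySem.Str.startswith v2 ":" = false := by
                  rw [← Bool.not_eq_true]
                  intro hcon
                  have := (pv_starts_iff v2).mp hcon
                  rw [hgl] at this
                  exact hc (Option.some.inj this)
                have hstc : PySem.Chars.startswith v2.toList [':'] = false := by simpa using hst
                simp [hc, hm, hstc]
        · have hmF : pvMatchAt orig ch k = false := by simpa using hm
          have hsne : pvStrip v1 ≠ pvStrip v2 := by
            intro hcon
            have hs0 : pvStrip v0 = pvStrip v2 := by
              rw [← pv_strip_decor (pvPreB orig k k ch) (pvPostB orig k k ch) v0, hv0tr]
              exact hcon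
            rw [hmatch] at hmF
            simp [hs0] at hmF
          unfold pvPairAct
          rw [if_neg hsne]
          simp [hmF]
      · intro hb0 v1 hv1
        have hmF := pv_match_none_right orig ch k orig[k + 1] hko1 hb0
        simp [hmF]
      · intro ha0 v2 hv2
        rw [pv_lookup_updAll_mem pvNms _ orig[k] ch (by decide) hch] at ha0
        have h0 : List.lookup ch orig[k] = none := by
          cases hl : List.lookup ch orig[k] with
          | none => rfl
          | some w => rw [hl] at ha0; simp at ha0
        have hmF := pv_match_none_left orig ch k orig[k] hko h0
        simp [hmF]
    have e1 : pvUpdAll pvNms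
        (fun ch w => if (pvMatchAt orig ch k && !PySem.Str.endswith w ":") = true
          then w ++ ":" else w)
        (pvUpdAll pvNms
          (fun ch v => pvDecor (pvPreB orig k k ch) (pvPostB orig k k ch) v) orig[k]) =
        pvUpdAll pvNms
          (fun ch v => pvDecor (pvPreB orig (k + 1) k ch) (pvPostB orig (k + 1) k ch) v)
          orig[k] := by
      rw [pv_updAll_updAll pvNms _ _ orig[k] (by decide)]
      apply pv_updAll_congr _ _ _ _ (by decide)
      intro ch hch v hv
      have b1 : pvPreB orig (k + 1) k ch = pvPreB orig k k ch := by
        unfold pvPreB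
        rw [decide_eq_true (by omega : k ≤ k + 1), decide_eq_true (by omega : k ≤ k)]
      have b2 : pvPostB orig (k + 1) k ch = pvMatchAt orig ch k := by
        unfold pvPostB; rw [decide_eq_true (by omega : k < k + 1)]; simp
      have b3 : pvPostB orig k k ch = false := by
        unfold pvPostB; rw [decide_eq_false (by omega : ¬ k < k)]; simp
      rw [b1, b2, b3]
      simp [pvDecor]
    have e2 : pvUpdAll pvNms
        (fun ch v => if (pvMatchAt orig ch k && !PySem.Str.startswith v ":") = true
          then ":" ++ v else v) orig[k + 1] =
        pvUpdAll pvNms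
          (fun ch v => pvDecor (pvPreB orig (k + 1) (k + 1) ch) (pvPostB orig (k + 1) (k + 1) ch) v)
          orig[k + 1] := by
      apply pv_updAll_congr _ _ _ _ (by decide)
      intro ch hch v hv
      have b1 : pvPreB orig (k + 1) (k + 1) ch = pvMatchAt orig ch k := by
        unfold pvPreB
        rw [decide_eq_true (by omega : 0 < k + 1), decide_eq_true (by omega : k + 1 ≤ k + 1)]
        simp
      have b2 : pvPostB orig (k + 1) (k + 1) ch = false := by
        unfold pvPostB; rw [decide_eq_false (by omega : ¬ k + 1 < k + 1)]; simp
      rw [b1, b2]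
      simp [pvDecor, pvDecor1]
    rw [e1, e2]
    apply List.ext_getElem (by simp [pvStateAt])
    intro j hj1 hj2
    rw [List.getElem_set, List.getElem_set]
    by_cases hjk1 : k + 1 = j
    · subst hjk1
      rw [if_pos rfl]
      simp only [pvStateAt, List.getElem_mapIdx]
    · rw [if_neg hjk1]
      by_cases hjk : k = j
      · subst hjk
        rw [if_pos rfl]
        simp only [pvStateAt, List.getElem_mapIdx]
      · rw [if_neg hjk]
        simp only [pvStateAt, List.getElem_mapIdx]
        apply pv_updAll_congr _ _ _ _ (by decide)
        intro ch hch v hv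
        have b1 : pvPreB orig k j ch = pvPreB orig (k + 1) j ch := by
          unfold pvPreB
          rw [decide_eq_decide.mpr (by omega : (j ≤ k) ↔ (j ≤ k + 1))]
        have b2 : pvPostB orig k j ch = pvPostB orig (k + 1) j ch := by
          unfold pvPostB
          rw [decide_eq_decide.mpr (by omega : (j < k) ↔ (j < k + 1))]
        rw [b1, b2]

-- ---- relating both programs to pvTFin ----



theorem pv_alt_eq (orig : List (List (String × String))) :
    connect_nms_blocks_old_alt orig =
      orig.mapIdx (fun j d => pvUpdAll pvNms (pvTFin orig j) d) := by
  unfold connect_nms_blocks_old_alt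
  apply List.ext_getElem (by simp)
  intro j hj1 hj2
  simp only [List.getElem_mapIdx]
  have hjlen : j < orig.length := by simpa using hj1
  have hfix : pvFixBlock (orig.map pvStripDict) orig.length j orig[j] =
      pvUpdAll pvNms (fun ch v =>
        let s := pvStrip v
        let v1 := if 0 < j ∧ List.lookup ch ((orig.map pvStripDict).getD (j - 1) []) = some s ∧
            ¬ PySem.Str.startswith v ":" = true then ":" ++ v else v
        if j + 1 < orig.length ∧
            List.lookup ch ((orig.map pvStripDict).getD (j + 1) []) = some s ∧
            ¬ PySem.Str.endswith v1 ":" = true then v1 ++ ":" else v1) orig[j] := rfl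
  rw [hfix]
  apply pv_updAll_congr _ _ _ _ (by decide)
  intro ch hch v hv
  have hstrip_at : ∀ (i : Nat) (hi : i < orig.length),
      (orig.map pvStripDict).getD i [] = pvStripDict orig[i] := by
    intro i hi
    rw [List.getD_eq_getElem?_getD, List.getElem?_map, List.getElem?_eq_getElem hi]
    rfl
  have hC1 : (0 < j ∧ List.lookup ch ((orig.map pvStripDict).getD (j - 1) []) = some (pvStrip v) ∧
      ¬ PySem.Str.startswith v ":" = true)
      ↔ ((decide (0 < j) && pvMatchAt orig ch (j - 1) && !PySem.Str.startswith v ":") = true) := by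
    constructor
    · rintro ⟨h0, hlk, hns⟩
      have hj1' : j - 1 < orig.length := by omega
      rw [hstrip_at (j - 1) hj1', pv_lookup_stripDict _ ch hch] at hlk
      obtain ⟨w, hw, hws⟩ := Option.map_eq_some_iff.mp hlk
      have hmatch := pv_match_intro orig ch (j - 1) orig[j - 1] orig[j] w v
        (List.getElem?_eq_getElem hj1')
        (by rw [show j - 1 + 1 = j from by omega]; exact List.getElem?_eq_getElem hjlen) hw hv
      rw [decide_eq_true h0, hmatch]
      have hnsb : PySem.Str.startswith v ":" = false := by
        cases hx : PySem.Str.startswith v ":"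
        · rfl
        · exact absurd hx hns
      have hnsc : PySem.Chars.startswith v.toList [':'] = false := by simpa using hnsb
      simp [hws, hnsc]
    · intro hb
      simp only [Bool.and_eq_true, decide_eq_true_eq, Bool.not_eq_eq_eq_not, Bool.not_true] at hb
      obtain ⟨⟨h0, hm⟩, hns⟩ := hb
      have hj1' : j - 1 < orig.length := by omega
      refine ⟨h0, ?_, by simpa using hns⟩
      rw [hstrip_at (j - 1) hj1', pv_lookup_stripDict _ ch hch]
      cases hw : List.lookup ch orig[j - 1] with
      | none =>
        rw [pv_match_none_left orig ch (j - 1) orig[j - 1]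
          (List.getElem?_eq_getElem hj1') hw] at hm
        simp at hm
      | some w =>
        have hmatch := pv_match_intro orig ch (j - 1) orig[j - 1] orig[j] w v
          (List.getElem?_eq_getElem hj1')
          (by rw [show j - 1 + 1 = j from by omega]; exact List.getElem?_eq_getElem hjlen) hw hv
        rw [hmatch] at hm
        have : pvStrip w = pvStrip v := beq_iff_eq.mp hm
        simp [this]
  have hC2 : ∀ (w : String), (j + 1 < orig.length ∧
      List.lookup ch ((orig.map pvStripDict).getD (j + 1) []) = some (pvStrip v) ∧
      ¬ PySem.Str.endswith w ":" = true)
      ↔ ((pvMatchAt orig ch j && !PySem.Str.endswith w ":") = true) := by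
    intro w
    constructor
    · rintro ⟨h0, hlk, hns⟩
      rw [hstrip_at (j + 1) h0, pv_lookup_stripDict _ ch hch] at hlk
      obtain ⟨u, hu, hus⟩ := Option.map_eq_some_iff.mp hlk
      have hmatch := pv_match_intro orig ch j orig[j] orig[j + 1] v u
        (List.getElem?_eq_getElem hjlen) (List.getElem?_eq_getElem h0) hv hu
      rw [hmatch]
      have hnsb : PySem.Str.endswith w ":" = false := by
        cases hx : PySem.Str.endswith w ":"
        · rfl
        · exact absurd hx hns
      have hnsc : PySem.Chars.endswith w.toList [':'] = false := by simpa using hnsb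
      simp [← hus, hnsc]
    · intro hb
      simp only [Bool.and_eq_true, Bool.not_eq_eq_eq_not, Bool.not_true] at hb
      obtain ⟨hm, hns⟩ := hb
      have h0 : j + 1 < orig.length := pv_match_lt orig ch j hm
      refine ⟨h0, ?_, by simpa using hns⟩
      rw [hstrip_at (j + 1) h0, pv_lookup_stripDict _ ch hch]
      cases hu : List.lookup ch orig[j + 1] with
      | none =>
        rw [pv_match_none_right orig ch j orig[j + 1] (List.getElem?_eq_getElem h0) hu] at hm
        simp at hm
      | some u =>
        have hmatch := pv_match_intro orig ch j orig[j] orig[j + 1] v u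
          (List.getElem?_eq_getElem hjlen) (List.getElem?_eq_getElem h0) hv hu
        rw [hmatch] at hm
        have : pvStrip v = pvStrip u := beq_iff_eq.mp hm
        simp [this]
  simp only [pvTFin, pvDecor, pvDecor1]
  rw [if_congr hC1 rfl rfl, if_congr (hC2 _) rfl rfl]

theorem pv_state_final (orig : List (List (String × String))) (h : orig ≠ []) :
    pvStateAt orig (orig.length - 1) =
      orig.mapIdx (fun j d => pvUpdAll pvNms (pvTFin orig j) d) := by
  apply List.ext_getElem (by simp [pvStateAt])
  intro j hj1 hj2
  simp only [pvStateAt, List.getElem_mapIdx]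
  apply pv_updAll_congr _ _ _ _ (by decide)
  intro ch hch v hv
  have hjlen : j < orig.length := by simpa [pvStateAt] using hj1
  unfold pvTFin
  have b1 : pvPreB orig (orig.length - 1) j ch =
      (decide (0 < j) && pvMatchAt orig ch (j - 1)) := by
    unfold pvPreB
    rw [decide_eq_true (by omega : j ≤ orig.length - 1)]
    simp
  have b2 : pvPostB orig (orig.length - 1) j ch = pvMatchAt orig ch j := by
    unfold pvPostB
    cases hm : pvMatchAt orig ch j with
    | true =>
      have := pv_match_lt orig ch j hm
      rw [decide_eq_true (by omega : j < orig.length - 1)]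
      simp
    | false => simp
  rw [b1, b2]

-- ===== VERDICT (by name: the statement is the Claim_ definition above) =====
theorem connect_nms_blocks_old_spec : Claim_equal_connect_nms_blocks_old := by
  intro inst _ hpre
  unfold Spec_connect_nms_blocks_old
  unfold connect_nms_blocks_old
  by_cases h0 : inst.length = 0
  · have : inst = [] := List.length_eq_zero_iff.mp h0
    subst this
    simp [connect_nms_blocks_old_alt]
  · rw [if_neg h0]
    rw [pv_main inst hpre (inst.length - 1) le_rfl]
    rw [pv_state_final inst (by intro hh; exact h0 (by simp [hh]))]
    rw [pv_alt_eq]
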